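-- pv_equiv track=rewrite | github.com/mmarcos05/Guia3conMartu | Cami/guia7cami.py | borra_pares
-- ===== SOURCE A (Python) =====
-- from typing import List, Tuple
--
-- def es_par(numero:int) -> bool:
--     if numero % 2 == 0:
--         return True
--     else:
--         return False
--
-- def borra_pares(lista:List[int]) -> List[int]:
--     i:int = 0
--     longitud:int = len(lista)
--     while i < longitud:
--         if es_par(lista[i]) == True:
--             lista.remove(lista[i])
--             lista.insert(i,0)
--             i += 1
--         else:
--             i += 1
--     return lista
-- ===== SOURCE B (Python) =====
-- from typing import List
--
-- def borra_pares(lista: List[int]) -> List[int]: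
--     return [0 if x % 2 == 0 else x for x in lista]
-- ===== Notes on version B (the rewrite author's own statement) =====
-- stated objective: simpler
-- what changed: Replaces the quadratic remove(first occurrence)+insert rescan loop by a single map that zeroes every even entry.
-- intended difference: On lists containing a zero that is preceded by an odd element that is itself preceded by an even element, A's remove() deletes an earlier zero and shifts already-processed odd elements forward (e.g. A([2,1,0]) = [1,0,0]), while B returns the list with every even entry replaced by 0 in place ([0,1,0]), which is the function's evident intent. — e.g. on borra_pares([2, 1, 0]): A returns [1, 0, 0], B returns [0, 1, 0]
import Mathlib
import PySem

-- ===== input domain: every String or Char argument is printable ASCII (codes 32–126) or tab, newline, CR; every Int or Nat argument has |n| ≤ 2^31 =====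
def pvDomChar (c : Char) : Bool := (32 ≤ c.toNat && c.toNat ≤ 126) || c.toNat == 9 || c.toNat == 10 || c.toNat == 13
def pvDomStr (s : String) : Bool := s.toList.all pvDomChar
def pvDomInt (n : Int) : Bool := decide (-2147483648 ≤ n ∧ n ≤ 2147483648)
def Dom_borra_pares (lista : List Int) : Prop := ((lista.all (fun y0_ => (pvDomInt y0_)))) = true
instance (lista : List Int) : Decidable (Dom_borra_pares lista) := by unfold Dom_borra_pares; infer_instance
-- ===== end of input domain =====

-- B zeroes every even entry in one map instead of A's per-element remove+insert
-- rescans (simpler); A mutates `lista` in place and returns it, B does not mutate —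
-- the equivalence claimed is about the return value.

-- ===== PORT A =====
def es_par (numero : Int) : Bool :=
  if PySem.Int.mod numero 2 == 0 then true else false

def borraLoopA (lista : List Int) (i longitud : Int) : List Int :=
  if i < longitud then
    match PySem.List.pyGet? lista i with
    | some v =>
      if es_par v == true then
        -- lista.remove(lista[i]): ValueError unreachable since v was read from lista
        borraLoopA (PySem.List.insert ((PySem.List.remove? lista v).getD lista) i 0)
          (i + 1) longitud
      else
        borraLoopA lista (i + 1) longitud
    | none => lista   -- IndexError: unreachable, the list keeps its original length
  else lista
termination_by (longitud - i).toNat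
decreasing_by all_goals omega

def borra_pares (lista : List Int) : List Int :=
  borraLoopA lista 0 (PySem.List.len lista)

-- ===== PORT B =====
def borra_pares_alt (lista : List Int) : List Int :=
  lista.map (fun x => if PySem.Int.mod x 2 == 0 then 0 else x)

-- ===== PRECONDITION & SPEC =====
-- helpers for D_: does the list contain an even entry, later an odd entry, and later a zero?
def pvAfterOdd (xs : List Int) : Bool := xs.any (fun z => z == 0)

def pvAfterEven : List Int → Bool
  | [] => false
  | x :: xs => if PySem.Int.mod x 2 == 0 then pvAfterEven xs else pvAfterOdd xs

def pvDscan : List Int → Bool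
  | [] => false
  | x :: xs => if PySem.Int.mod x 2 == 0 then pvAfterEven xs else pvDscan xs

-- On lists containing a zero preceded by an odd element that is itself preceded by an
-- even element, A's remove() deletes an earlier zero and shifts already-processed odd
-- elements forward (A([2,1,0]) = [1,0,0]); B replaces every even entry by 0 in place
-- ([0,1,0]), which is the function's evident intent.
def D_borra_pares (lista : List Int) : Prop := pvDscan lista = true
instance (lista : List Int) : Decidable (D_borra_pares lista) := by unfold D_borra_pares; infer_instance

def Spec_borra_pares (lista : List Int) (out : List Int) : Prop := ¬ D_borra_pares lista → out = borra_pares_alt lista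
instance (lista : List Int) (out : List Int) : Decidable (Spec_borra_pares lista out) := by unfold Spec_borra_pares; infer_instance

def pvDiffWitness_borra_pares : List Int := [2, 1, 0]
def pvDiffWitnessOut_borra_pares : (List Int) × (List Int) := ([1, 0, 0], [0, 1, 0])

-- ===== CLAIM (what is proved, stated in full; the proofs are below) =====
def Claim_unchanged_borra_pares : Prop := ∀ (lista : List Int), Dom_borra_pares lista → Spec_borra_pares lista (borra_pares lista)
def Claim_changed_borra_pares : Prop := Dom_borra_pares (pvDiffWitness_borra_pares) ∧ D_borra_pares (pvDiffWitness_borra_pares) ∧ borra_pares (pvDiffWitness_borra_pares) = pvDiffWitnessOut_borra_pares.1 ∧ borra_pares_alt (pvDiffWitness_borra_pares) = pvDiffWitnessOut_borra_pares.2 ∧ pvDiffWitnessOut_borra_pares.1 ≠ pvDiffWitnessOut_borra_pares.2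

-- ===== LEMMAS AND PROOFS =====

-- What one iteration of A's loop does to the already-processed prefix P.
def stepP (P : List Int) (x : Int) : List Int :=
  if x = 0 then
    if 0 ∈ P then P.erase 0 ++ [0, 0] else P ++ [0]
  else if PySem.Int.mod x 2 = 0 then P ++ [0] else P ++ [x]

-- the value B maps over the list
def pvF (x : Int) : Int := if PySem.Int.mod x 2 == 0 then 0 else x

-- prefix invariant: every already-processed element is 0 or odd
def GoodP (P : List Int) : Prop := ∀ y ∈ P, y = 0 ∨ PySem.Int.mod y 2 ≠ 0

lemma goodP_stepP {P : List Int} (h : GoodP P) (x : Int) : GoodP (stepP P x) := by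
  intro y hy
  unfold stepP at hy
  split_ifs at hy with h0 h0m hm
  all_goals rcases List.mem_append.1 hy with hy | hy
  · exact h y (List.mem_of_mem_erase hy)
  · left; simpa using hy
  · exact h y hy
  · left; simpa using hy
  · exact h y hy
  · left; simpa using hy
  · exact h y hy
  · right; simp at hy; subst hy; exact hm

lemma length_stepP (P : List Int) (x : Int) : (stepP P x).length = P.length + 1 := by
  unfold stepP
  split_ifs with h0 h0m hm
  · have h1 := List.length_erase_of_mem h0m
    have h2 := List.length_pos_of_mem h0m
    simp [h1]; omega
  · simp
  · simp
  · simp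

lemma borraLoopA_step (lista : List Int) (i longitud v : Int)
    (h1 : i < longitud) (h2 : PySem.List.pyGet? lista i = some v) :
    borraLoopA lista i longitud =
      if es_par v == true then
        borraLoopA (PySem.List.insert ((PySem.List.remove? lista v).getD lista) i 0)
          (i + 1) longitud
      else borraLoopA lista (i + 1) longitud := by
  rw [borraLoopA, if_pos h1, h2]

lemma borraLoopA_stop (lista : List Int) (i longitud : Int) (h : ¬ i < longitud) :
    borraLoopA lista i longitud = lista := by
  rw [borraLoopA, if_neg h]

lemma insert_at_prefix (P rest : List Int) (v : Int) :
    PySem.List.insert (P ++ rest) (P.length : Int) v = P ++ v :: rest := by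
  rw [PySem.List.insert_natCast _ _ _ (by simp)]
  simp

lemma not_zero_mem_of_odd {F : List Int} (hF : ∀ y ∈ F, PySem.Int.mod y 2 ≠ 0) :
    (0 : Int) ∉ F := by
  intro h
  exact hF 0 h (by decide)

lemma A_loop (rest : List Int) : ∀ (P : List Int), GoodP P →
    borraLoopA (P ++ rest) (P.length : Int) ((P.length : Int) + rest.length) =
      rest.foldl stepP P := by
  induction rest with
  | nil =>
    intro P _
    rw [borraLoopA_stop _ _ _ (by simp)]
    simp
  | cons x rest' ih =>
    intro P hP
    have hlt : (P.length : Int) < (P.length : Int) + (x :: rest').length := by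
      simp only [List.length_cons]; omega
    have hget : PySem.List.pyGet? (P ++ x :: rest') (P.length : Int) = some x := by
      rw [PySem.List.pyGet?_natCast]
      simp
    rw [borraLoopA_step _ _ _ x hlt hget]
    by_cases hx : PySem.Int.mod x 2 = 0
    · -- even branch of A
      have hpar : (es_par x == true) = true := by
        unfold es_par; rw [beq_iff_eq.mpr hx]; simp
      rw [if_pos hpar]
      have hmem : x ∈ P ++ x :: rest' := by simp
      have hl1 : ((PySem.List.remove? (P ++ x :: rest') x).getD (P ++ x :: rest')) =
          (P ++ x :: rest').erase x := by
        rw [PySem.List.remove?_eq_some_erase _ x hmem]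
        rfl
      rw [hl1]
      by_cases hxy : x = 0 ∧ 0 ∈ P
      · -- x = 0 and P already contains a zero: the first zero of P is removed
        obtain ⟨hx0, h0P⟩ := hxy
        subst hx0
        have herase : ((P ++ (0 : Int) :: rest').erase 0) = P.erase 0 ++ (0 : Int) :: rest' :=
          List.erase_append_left _ h0P
        have hlen : (P.erase 0 ++ [(0 : Int)]).length = P.length := by
          have h1 := List.length_erase_of_mem h0P
          have h2 := List.length_pos_of_mem h0P
          simp [h1]; omega
        have hsplit : P.erase 0 ++ (0 : Int) :: rest' = (P.erase 0 ++ [0]) ++ rest' := by simp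
        have hins : PySem.List.insert (P.erase 0 ++ (0 : Int) :: rest') (P.length : Int) 0 =
            (P.erase 0 ++ [0, 0]) ++ rest' := by
          rw [hsplit, ← hlen, insert_at_prefix]
          simp
        simp only [herase, hins]
        have hstep : stepP P 0 = P.erase 0 ++ [0, 0] := by simp [stepP, h0P]
        have hgood : GoodP (P.erase 0 ++ [0, 0]) := hstep ▸ goodP_stepP hP 0
        have hlen2 : ((P.erase 0 ++ [0, 0]) : List Int).length = P.length + 1 := by
          rw [← hstep, length_stepP]
        have := ih (P.erase 0 ++ [0, 0]) hgood
        rw [hlen2] at this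
        have harith1 : (P.length : Int) + 1 = ((P.length + 1 : Nat) : Int) := by omega
        have harith2 : (P.length : Int) + (((0:Int)) :: rest').length = ((P.length + 1 : Nat) : Int) + rest'.length := by
          simp only [List.length_cons]; omega
        rw [harith1, harith2] at *
        rw [this]
        simp [List.foldl_cons, hstep]
      · -- the first occurrence of x is at position i itself
        have hxP : x ∉ P := by
          intro hmemP
          rcases hP x hmemP with h0 | hodd
          · exact hxy ⟨h0, h0 ▸ hmemP⟩
          · exact hodd hx
        have herase : (P ++ x :: rest').erase x = P ++ rest' := by
          rw [List.erase_append_right _ hxP, List.erase_cons_head]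
        have hins : PySem.List.insert (P ++ rest') (P.length : Int) 0 = (P ++ [0]) ++ rest' := by
          rw [insert_at_prefix]; simp
        simp only [herase, hins]
        have hstep : stepP P x = P ++ [0] := by
          unfold stepP
          by_cases h0 : x = 0
          · subst h0
            rw [if_pos rfl, if_neg (fun h => hxy ⟨rfl, h⟩)]
          · rw [if_neg h0, if_pos hx]
        have hgood : GoodP (P ++ [0]) := hstep ▸ goodP_stepP hP x
        have := ih (P ++ [0]) hgood
        have hlen2 : ((P ++ [(0:Int)]) : List Int).length = P.length + 1 := by simp
        rw [hlen2] at this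
        have harith1 : (P.length : Int) + 1 = ((P.length + 1 : Nat) : Int) := by omega
        have harith2 : (P.length : Int) + ((x :: rest') : List Int).length = ((P.length + 1 : Nat) : Int) + rest'.length := by
          simp only [List.length_cons]; omega
        rw [harith1, harith2, this]
        simp [List.foldl_cons, hstep]
    · -- odd branch of A: nothing changes, the element joins the prefix
      have hpar : ¬ ((es_par x == true) = true) := by
        unfold es_par; rw [beq_eq_false_iff_ne.mpr hx]; simp
      rw [if_neg hpar]
      have hsplit : P ++ x :: rest' = (P ++ [x]) ++ rest' := by simp
      have hstep : stepP P x = P ++ [x] := by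
        unfold stepP
        rw [if_neg (fun h0 => hx (by rw [h0]; decide)), if_neg hx]
      have hgood : GoodP (P ++ [x]) := hstep ▸ goodP_stepP hP x
      have := ih (P ++ [x]) hgood
      have hlen2 : ((P ++ [x]) : List Int).length = P.length + 1 := by simp
      rw [hlen2] at this
      have harith1 : (P.length : Int) + 1 = ((P.length + 1 : Nat) : Int) := by omega
      have harith2 : (P.length : Int) + ((x :: rest') : List Int).length = ((P.length + 1 : Nat) : Int) + rest'.length := by
        simp only [List.length_cons]; omega
      rw [hsplit, harith1, harith2, this]
      simp [List.foldl_cons, hstep]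

lemma A_eq_fold (lista : List Int) : borra_pares lista = lista.foldl stepP [] := by
  unfold borra_pares
  have hA := A_loop lista [] (by intro y h; cases h)
  simp only [List.nil_append, List.length_nil, Nat.cast_zero, zero_add] at hA
  rw [PySem.List.len_eq, hA]

-- phase 3: no zero occurs any more, every step appends pvF of the element
lemma fold_no_zero (ys : List Int) : ∀ (P : List Int), (∀ z ∈ ys, z ≠ 0) →
    ys.foldl stepP P = P ++ ys.map pvF := by
  induction ys with
  | nil => intro P _; simp
  | cons y ys' ih =>
    intro P hz
    have hy0 : y ≠ 0 := hz y (by simp)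
    have hstep : stepP P y = P ++ [pvF y] := by
      unfold stepP pvF
      rw [if_neg hy0]
      by_cases he : PySem.Int.mod y 2 = 0
      · rw [if_pos he, if_pos (beq_iff_eq.mpr he)]
      · rw [if_neg he, if_neg (by simpa using he)]
    rw [List.foldl_cons, hstep, ih _ (fun z hzm => hz z (by simp [hzm]))]
    simp

lemma rep_two (k : Nat) : List.replicate k (0:Int) ++ [0, 0] = 0 :: 0 :: List.replicate k 0 := by
  induction k with
  | zero => rfl
  | succ n ihn => simp [List.replicate_succ, ihn]

-- phase 2: after the first even element the prefix is odds O then zeros only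
lemma fold_after_even (xs : List Int) : ∀ (O : List Int) (m : Nat),
    pvAfterEven xs = false → (∀ y ∈ O, PySem.Int.mod y 2 ≠ 0) →
    xs.foldl stepP (O ++ List.replicate m 0) = (O ++ List.replicate m 0) ++ xs.map pvF := by
  induction xs with
  | nil => intro O m _ _; simp
  | cons x xs' ih =>
    intro O m hae hO
    have h0O : (0 : Int) ∉ O := not_zero_mem_of_odd hO
    by_cases he : PySem.Int.mod x 2 = 0
    · -- x even: the prefix grows by one zero
      have hae' : pvAfterEven xs' = false := by
        rw [pvAfterEven] at hae; rwa [if_pos (by rw [he]; rfl)] at hae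
      have hf : pvF x = 0 := by unfold pvF; rw [if_pos (beq_iff_eq.mpr he)]
      have hstep : stepP (O ++ List.replicate m 0) x = O ++ List.replicate (m + 1) 0 := by
        unfold stepP
        by_cases hx0 : x = 0
        · subst hx0
          cases m with
          | zero =>
            rw [if_pos rfl, if_neg (by simpa using h0O)]
            simp [List.replicate_succ]
          | succ k =>
            rw [if_pos rfl, if_pos (by simp [List.replicate_succ])]
            rw [List.erase_append_right _ h0O]
            simp [List.replicate_succ, rep_two]
        · rw [if_neg hx0, if_pos he]
          simp [List.replicate_succ']
      rw [List.foldl_cons, hstep, ih O (m + 1) hae' hO]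
      simp [hf, List.replicate_succ']
    · -- x odd: no zero occurs afterwards
      have hnz : ∀ z ∈ xs', z ≠ 0 := by
        have hae2 : pvAfterOdd xs' = false := by rw [pvAfterEven] at hae; rwa [if_neg (by rw [beq_eq_false_iff_ne.mpr he]; exact Bool.false_ne_true)] at hae
        intro z hzm hz0
        have : pvAfterOdd xs' = true := by
          unfold pvAfterOdd
          exact List.any_eq_true.2 ⟨z, hzm, by simp [hz0]⟩
        rw [hae2] at this; cases this
      have hx0 : x ≠ 0 := fun h => he (by rw [h]; decide)
      have hstep : stepP (O ++ List.replicate m 0) x = (O ++ List.replicate m 0) ++ [x] := by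
        unfold stepP
        rw [if_neg hx0, if_neg he]
      have hf : pvF x = x := by unfold pvF; rw [if_neg (by simpa using he)]
      rw [List.foldl_cons, hstep, fold_no_zero xs' _ hnz]
      simp [hf]

-- phase 1: leading odds pass through unchanged
lemma fold_scan (l : List Int) : ∀ (O : List Int),
    pvDscan l = false → (∀ y ∈ O, PySem.Int.mod y 2 ≠ 0) →
    l.foldl stepP O = O ++ l.map pvF := by
  induction l with
  | nil => intro O _ _; simp
  | cons x xs ih =>
    intro O hd hO
    by_cases he : PySem.Int.mod x 2 = 0
    · have hae : pvAfterEven xs = false := by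
        rw [pvDscan] at hd; rwa [if_pos (by rw [he]; rfl)] at hd
      have hf : pvF x = 0 := by unfold pvF; rw [if_pos (beq_iff_eq.mpr he)]
      have hstep : stepP O x = O ++ List.replicate 1 0 := by
        unfold stepP
        by_cases hx0 : x = 0
        · subst hx0
          rw [if_pos rfl, if_neg (not_zero_mem_of_odd hO)]
          simp
        · rw [if_neg hx0, if_pos he]
          simp
      rw [List.foldl_cons, hstep, fold_after_even xs O 1 hae hO]
      simp [hf]
    · have hd' : pvDscan xs = false := by
        rw [pvDscan] at hd; rwa [if_neg (by rw [beq_eq_false_iff_ne.mpr he]; exact Bool.false_ne_true)] at hd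
      have hx0 : x ≠ 0 := fun h => he (by rw [h]; decide)
      have hstep : stepP O x = O ++ [x] := by
        unfold stepP
        rw [if_neg hx0, if_neg he]
      have hO' : ∀ y ∈ O ++ [x], PySem.Int.mod y 2 ≠ 0 := by
        intro y hy
        rcases List.mem_append.1 hy with hy | hy
        · exact hO y hy
        · simp at hy; subst hy; exact he
      have hf : pvF x = x := by unfold pvF; rw [if_neg (by simpa using he)]
      rw [List.foldl_cons, hstep, ih _ hd' hO']
      simp [hf]

-- ===== VERDICT (by name: the statements are the Claim_ definitions above) =====
theorem borra_pares_spec : Claim_unchanged_borra_pares := by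
  unfold Claim_unchanged_borra_pares
  intro lista _ hD
  unfold D_borra_pares at hD
  have hd : pvDscan lista = false := by
    cases h : pvDscan lista
    · rfl
    · exact absurd h hD
  rw [A_eq_fold, fold_scan lista [] hd (by intro y h; cases h)]
  rfl

theorem borra_pares_changed : Claim_changed_borra_pares := by
  unfold Claim_changed_borra_pares
  refine ⟨by decide, by decide, ?_, by decide, by decide⟩
  rw [A_eq_fold]
  decide
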